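-- pv_equiv track=rewrite | github.com/hheh47660/silk_waste | uni/CyberChallengeTraining/2023/2023Es3.py | minWorkers
-- ===== SOURCE A (Python) =====
-- def minWorkers(times, T):
--     lo = 1
--     hi = len(times) + 1
--
--     while lo < hi:
--         medium = lo + (hi - lo) // 2
--         if timeNeeded(times, medium) <= T:
--             hi = medium
--         else:
--             lo = medium + 1
--
--     return medium
--
-- def timeNeeded(times, w):
--     workers = [0] * w
--     r = 0
--     i = 0
--     while r < len(times):
--         if workers[i] == min(workers):
--             workers[i] += times[r]
--             r = r + 1
--         i = (i + 1) % w
--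
--     return max(workers)
-- ===== SOURCE B (Python) =====
-- def minWorkers(times, T):
--     def time_needed(w):
--         workers = [0] * w
--         i = 0
--         for t in times:
--             best = min(workers)
--             j = i
--             while workers[j] != best:
--                 j = (j + 1) % w
--             workers[j] += t
--             i = (j + 1) % w
--         return max(workers)
--
--     def search(lo, hi):
--         medium = lo + (hi - lo) // 2
--         if time_needed(medium) <= T:
--             if lo < medium:
--                 return search(lo, medium)
--             return medium
--         else:
--             if medium + 1 < hi:
--                 return search(medium + 1, hi)
--             return medium
--
--     return search(1, len(times) + 1)
-- ===== Notes on version B (the rewrite author's own statement) =====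
-- stated objective: faster
-- what changed: The scheduler no longer spins index-by-index re-computing min(workers) at every step: B computes the minimum once per task and jumps directly to the first least-loaded worker at or after the cursor (O(w) per task instead of O(w^2)), and the outer binary search is recursive instead of a while loop.
import Mathlib
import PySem

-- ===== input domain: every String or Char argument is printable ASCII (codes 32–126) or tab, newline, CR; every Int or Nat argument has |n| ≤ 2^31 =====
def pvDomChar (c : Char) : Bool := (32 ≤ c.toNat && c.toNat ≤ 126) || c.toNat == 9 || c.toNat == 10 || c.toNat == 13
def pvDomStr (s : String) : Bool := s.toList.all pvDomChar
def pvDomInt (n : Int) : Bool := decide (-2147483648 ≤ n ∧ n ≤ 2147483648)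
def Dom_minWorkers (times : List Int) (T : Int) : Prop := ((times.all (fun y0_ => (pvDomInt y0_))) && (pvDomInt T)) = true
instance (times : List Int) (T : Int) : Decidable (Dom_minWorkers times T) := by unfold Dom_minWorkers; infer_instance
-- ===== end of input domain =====

-- B replaces A's per-step spin (which re-computes min(workers) at every index advance) by a direct
-- jump to the first least-loaded worker at or after the cursor, and makes the binary search recursive.

-- ===== PORT A =====
-- the inner `while r < len(times)` loop of timeNeeded; fuel only makes the loop total
-- (it is proved sufficient below); state (workers, r, i) exactly as in the Python.
def pvTnLoopA (times : List Int) (w : Nat) (fuel : Nat) (workers : List Int) (r i : Nat) : List Int :=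
  match fuel with
  | 0 => workers
  | fuel + 1 =>
    if r < times.length then
      if PySem.List.pyGet? workers (i : Int) = PySem.List.min? workers (fun x => x) then
        pvTnLoopA times w fuel (workers.set i (workers.getD i 0 + times.getD r 0)) (r + 1) ((i + 1) % w)
      else
        pvTnLoopA times w fuel workers r ((i + 1) % w)
    else workers

def pvTimeNeededA (times : List Int) (w : Int) : Int :=
  (PySem.List.max? (pvTnLoopA times w.toNat ((times.length + 1) * (w.toNat + 1))
      (List.replicate w.toNat 0) 0 0) (fun x => x)).getD 0

-- the `while lo < hi` loop; `medium` is carried because A returns it after the loop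
def pvBsLoopA (times : List Int) (T : Int) (fuel : Nat) (lo hi medium : Int) : Int :=
  match fuel with
  | 0 => medium
  | fuel + 1 =>
    if lo < hi then
      let m := lo + PySem.Int.floordiv (hi - lo) 2
      if pvTimeNeededA times m ≤ T then pvBsLoopA times T fuel lo m m
      else pvBsLoopA times T fuel (m + 1) hi m
    else medium

def minWorkers (times : List Int) (T : Int) : Int :=
  pvBsLoopA times T (times.length + 2) 1 ((times.length : Int) + 1) 0

-- ===== PORT B =====
-- Source B's `while workers[j] != best` jump; fuel (= w at call site) only makes it total
def pvFindMin (workers : List Int) (best : Int) (w : Nat) (fuel j : Nat) : Nat :=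
  match fuel with
  | 0 => j
  | fuel + 1 =>
    if workers.getD j 0 = best then j
    else pvFindMin workers best w fuel ((j + 1) % w)

-- one iteration of Source B's `for t in times` loop, state (workers, i)
def pvStepB (w : Nat) (st : List Int × Nat) (t : Int) : List Int × Nat :=
  let best := (PySem.List.min? st.1 (fun x => x)).getD 0
  let j := pvFindMin st.1 best w w st.2
  (st.1.set j (st.1.getD j 0 + t), (j + 1) % w)

def pvTimeNeededB (times : List Int) (w : Nat) : Int :=
  (PySem.List.max? (times.foldl (pvStepB w) (List.replicate w 0, 0)).1 (fun x => x)).getD 0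

-- Source B's recursive search(lo, hi)
def pvSearchB (times : List Int) (T : Int) (fuel : Nat) (lo hi : Int) : Int :=
  match fuel with
  | 0 => 0
  | fuel + 1 =>
    let m := lo + PySem.Int.floordiv (hi - lo) 2
    if pvTimeNeededB times m.toNat ≤ T then
      if lo < m then pvSearchB times T fuel lo m else m
    else
      if m + 1 < hi then pvSearchB times T fuel (m + 1) hi else m

def minWorkers_alt (times : List Int) (T : Int) : Int :=
  pvSearchB times T (times.length + 2) 1 ((times.length : Int) + 1)

-- ===== PRECONDITION & SPEC =====
-- Pre_ excludes only times = [], on which A's while loop never runs and A raises UnboundLocalError.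
def Pre_minWorkers (times : List Int) (T : Int) : Prop := times ≠ []
instance (times : List Int) (T : Int) : Decidable (Pre_minWorkers times T) := by unfold Pre_minWorkers; infer_instance
def pvWitness_minWorkers : List Int × Int := ([3, 1, 4], 4)

def Spec_minWorkers (times : List Int) (T : Int) (out : Int) : Prop := out = minWorkers_alt times T
instance (times : List Int) (T : Int) (out : Int) : Decidable (Spec_minWorkers times T out) := by unfold Spec_minWorkers; infer_instance

-- ===== CLAIM (what is proved, stated in full; the proofs are below) =====
def Claim_equal_minWorkers : Prop := ∀ (times : List Int) (T : Int), Dom_minWorkers times T → Pre_minWorkers times T → Spec_minWorkers times T (minWorkers times T)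

-- ===== LEMMAS AND PROOFS =====

lemma pvFindMin_eq (workers : List Int) (best : Int) (w : Nat) (hw : workers.length = w)
    (hwpos : 0 < w) :
    ∀ (d i fuel : Nat), i < w → d < fuel →
      (∀ k, k < d → workers.getD ((i + k) % w) 0 ≠ best) →
      workers.getD ((i + d) % w) 0 = best →
      pvFindMin workers best w fuel i = (i + d) % w := by
  intro d
  induction d with
  | zero =>
      intro i fuel hi hf _ hd
      obtain ⟨f, rfl⟩ : ∃ f, fuel = f + 1 := ⟨fuel - 1, by omega⟩
      simp only [Nat.add_zero, Nat.mod_eq_of_lt hi] at hd ⊢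
      simp only [pvFindMin]
      rw [if_pos hd]
  | succ d ih =>
      intro i fuel hi hf h0 hd
      obtain ⟨f, rfl⟩ : ∃ f, fuel = f + 1 := ⟨fuel - 1, by omega⟩
      have hne : workers.getD i 0 ≠ best := by
        have := h0 0 (by omega)
        simpa [Nat.mod_eq_of_lt hi] using this
      have hstep : pvFindMin workers best w (f + 1) i = pvFindMin workers best w f ((i + 1) % w) := by
        simp only [pvFindMin]
        rw [if_neg hne]
      rw [hstep]
      have hmod : ∀ k : Nat, ((i + 1) % w + k) % w = (i + 1 + k) % w := by
        intro k; rw [Nat.mod_add_mod]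
      have := ih ((i + 1) % w) f (Nat.mod_lt _ hwpos) (by omega)
        (fun k hk => by rw [hmod k]; have := h0 (k + 1) (by omega); simpa [Nat.add_assoc, Nat.add_comm 1 k] using this)
        (by rw [hmod d]; simpa [Nat.add_assoc, Nat.add_comm 1 d] using hd)
      rw [this, hmod d]
      congr 1
      omega

lemma pvTnLoopA_spin (times workers : List Int) (w : Nat) (best : Int) (r : Nat)
    (hw : workers.length = w) (hwpos : 0 < w)
    (hmin : PySem.List.min? workers (fun x => x) = some best)
    (hr : r < times.length) :
    ∀ (d i fuel : Nat), i < w → d + 1 ≤ fuel →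
      (∀ k, k < d → workers.getD ((i + k) % w) 0 ≠ best) →
      workers.getD ((i + d) % w) 0 = best →
      pvTnLoopA times w fuel workers r i =
        pvTnLoopA times w (fuel - (d + 1))
          (workers.set ((i + d) % w) (workers.getD ((i + d) % w) 0 + times.getD r 0))
          (r + 1) (((i + d) % w + 1) % w) := by
  intro d
  induction d with
  | zero =>
      intro i fuel hi hf _ hd
      obtain ⟨f, rfl⟩ : ∃ f, fuel = f + 1 := ⟨fuel - 1, by omega⟩
      simp only [Nat.add_zero, Nat.mod_eq_of_lt hi] at hd ⊢
      have hidx : i < workers.length := by omega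
      have hcond : PySem.List.pyGet? workers (i : Int) = PySem.List.min? workers (fun x => x) := by
        rw [PySem.List.pyGet?_natCast, hmin, List.getElem?_eq_getElem hidx]
        have : workers.getD i 0 = workers[i] := List.getD_eq_getElem workers 0 hidx
        rw [← this, hd]
      simp only [pvTnLoopA]
      rw [if_pos hr, if_pos hcond]
      norm_num
  | succ d ih =>
      intro i fuel hi hf h0 hd
      obtain ⟨f, rfl⟩ : ∃ f, fuel = f + 1 := ⟨fuel - 1, by omega⟩
      have hidx : i < workers.length := by omega
      have hne : workers.getD i 0 ≠ best := by
        have := h0 0 (by omega)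
        simpa [Nat.mod_eq_of_lt hi] using this
      have hcond : ¬ (PySem.List.pyGet? workers (i : Int) = PySem.List.min? workers (fun x => x)) := by
        rw [PySem.List.pyGet?_natCast, hmin, List.getElem?_eq_getElem hidx]
        intro hcontra
        apply hne
        have : workers.getD i 0 = workers[i] := List.getD_eq_getElem workers 0 hidx
        rw [this]
        exact Option.some.inj hcontra
      have hstep : pvTnLoopA times w (f + 1) workers r i = pvTnLoopA times w f workers r ((i + 1) % w) := by
        simp only [pvTnLoopA]
        rw [if_pos hr, if_neg hcond]
      rw [hstep]
      have hmod : ∀ k : Nat, ((i + 1) % w + k) % w = (i + 1 + k) % w := by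
        intro k; rw [Nat.mod_add_mod]
      have := ih ((i + 1) % w) f (Nat.mod_lt _ hwpos) (by omega)
        (fun k hk => by rw [hmod k]; have := h0 (k + 1) (by omega); simpa [Nat.add_assoc, Nat.add_comm 1 k] using this)
        (by rw [hmod d]; simpa [Nat.add_assoc, Nat.add_comm 1 d] using hd)
      rw [this, hmod d]
      have he : (i + 1 + d) % w = (i + (d + 1)) % w := by congr 1; omega
      rw [he]
      congr 1
      omega

lemma pvExistsBestIdx (workers : List Int) (w : Nat) (best : Int)
    (hw : workers.length = w) (hwpos : 0 < w)
    (hmin : PySem.List.min? workers (fun x => x) = some best) :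
    ∀ i, i < w → ∃ k, k < w ∧ workers.getD ((i + k) % w) 0 = best := by
  intro i hi
  have hmem : best ∈ workers := PySem.List.min?_mem hmin
  obtain ⟨m, hm, hbm⟩ := List.mem_iff_getElem.mp hmem
  refine ⟨(m + w - i) % w, Nat.mod_lt _ hwpos, ?_⟩
  have h1 : (i + (m + w - i) % w) % w = (i + (m + w - i)) % w := Nat.add_mod_mod _ _ _
  have h2 : i + (m + w - i) = m + w := by omega
  have h3 : (m + w) % w = m := by
    rw [Nat.add_mod_right]; exact Nat.mod_eq_of_lt (by omega)
  rw [h1, h2, h3]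
  rw [List.getD_eq_getElem workers 0 hm]
  exact hbm

lemma pvTn_fold (times : List Int) (w : Nat) (hwpos : 0 < w) :
    ∀ (rest : List Int) (r : Nat) (workers : List Int) (i fuel : Nat),
      rest = times.drop r → workers.length = w → i < w →
      rest.length * w + 1 ≤ fuel →
      pvTnLoopA times w fuel workers r i = (rest.foldl (pvStepB w) (workers, i)).1 := by
  intro rest
  induction rest with
  | nil =>
      intro r workers i fuel hdrop hw hi hf
      obtain ⟨f, rfl⟩ : ∃ f, fuel = f + 1 := ⟨fuel - 1, by omega⟩
      have hr : ¬ r < times.length := by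
        have := List.drop_eq_nil_iff.mp hdrop.symm
        omega
      simp [pvTnLoopA, hr]
  | cons t rest' ih =>
      intro r workers i fuel hdrop hw hi hf
      have hr : r < times.length := by
        by_contra hcontra
        rw [List.drop_eq_nil_of_le (by omega)] at hdrop
        exact List.cons_ne_nil t rest' hdrop
      rw [List.drop_eq_getElem_cons hr] at hdrop
      obtain ⟨ht, hrest'⟩ : t = times[r] ∧ rest' = times.drop (r + 1) := by
        exact ⟨(List.cons.injEq _ _ _ _ ▸ hdrop).1, (List.cons.injEq _ _ _ _ ▸ hdrop).2⟩
      have hne : workers ≠ [] := by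
        intro hcontra; rw [hcontra] at hw; simp at hw; omega
      obtain ⟨best, hmin⟩ : ∃ best, PySem.List.min? workers (fun x => x) = some best := by
        cases workers with
        | nil => exact absurd rfl hne
        | cons a l => exact ⟨List.foldl min a l, PySem.List.min?_id_cons a l⟩
      obtain ⟨k, hk, hbk⟩ := pvExistsBestIdx workers w best hw hwpos hmin i hi
      have hex : ∃ d, workers.getD ((i + d) % w) 0 = best := ⟨k, hbk⟩
      set d := Nat.find hex with hdd
      have hd : workers.getD ((i + d) % w) 0 = best := Nat.find_spec hex
      have h0 : ∀ j, j < d → workers.getD ((i + j) % w) 0 ≠ best :=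
        fun j hj => Nat.find_min hex hj
      have hdw : d < w := by
        have : d ≤ k := Nat.find_min' hex hbk
        omega
      set j := (i + d) % w with hjj
      have hspin := pvTnLoopA_spin times workers w best r hw hwpos hmin hr d i fuel hi (by
        have : (rest'.length + 1) * w = rest'.length * w + w := by ring
        simp [List.length_cons] at hf
        omega) h0 hd
      rw [hspin]
      have hgetd : times.getD r 0 = t := by
        rw [List.getD_eq_getElem times 0 hr, ht]
      -- the B side: one fold step
      have hstepB : pvStepB w (workers, i) t =
          (workers.set j (workers.getD j 0 + t), (j + 1) % w) := by
        simp only [pvStepB, hmin, Option.getD_some]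
        rw [pvFindMin_eq workers best w hw hwpos d i w hi hdw h0 hd]
      rw [List.foldl_cons, hstepB]
      rw [hgetd]
      exact ih (r + 1) (workers.set j (workers.getD j 0 + t)) ((j + 1) % w)
        (fuel - (d + 1)) hrest' (by simp [hw]) (Nat.mod_lt _ hwpos)
        (by simp [List.length_cons] at hf
            have : (rest'.length + 1) * w = rest'.length * w + w := by ring
            omega)

lemma pvTn_eq (times : List Int) (w : Int) (hw : 1 ≤ w) :
    pvTimeNeededA times w = pvTimeNeededB times w.toNat := by
  have hwpos : 0 < w.toNat := by omega
  unfold pvTimeNeededA pvTimeNeededB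
  rw [pvTn_fold times w.toNat hwpos times 0 (List.replicate w.toNat 0) 0
    ((times.length + 1) * (w.toNat + 1)) (by simp) (by simp) hwpos (by
      have hexp : (times.length + 1) * (w.toNat + 1) =
          times.length * w.toNat + times.length + w.toNat + 1 := by ring
      omega)]

lemma pvBsA_stop (times : List Int) (T : Int) (f : Nat) (lo hi medium : Int)
    (h : ¬ lo < hi) : pvBsLoopA times T (f + 1) lo hi medium = medium := by
  simp [pvBsLoopA, h]

lemma pvBs_eq (times : List Int) (T : Int) :
    ∀ (k : Nat) (lo hi medium : Int) (fA fB : Nat),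
      1 ≤ lo → lo < hi → (hi - lo).toNat ≤ k → k + 1 ≤ fA → k + 1 ≤ fB →
      pvBsLoopA times T fA lo hi medium = pvSearchB times T fB lo hi := by
  intro k
  induction k with
  | zero => intro lo hi medium fA fB h1 h2 h3 _ _; omega
  | succ k ih =>
      intro lo hi medium fA fB h1 h2 h3 hfA hfB
      obtain ⟨fA', rfl⟩ : ∃ f, fA = f + 1 := ⟨fA - 1, by omega⟩
      obtain ⟨fB', rfl⟩ : ∃ f, fB = f + 1 := ⟨fB - 1, by omega⟩
      have hfd : PySem.Int.floordiv (hi - lo) 2 = (hi - lo) / 2 :=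
        PySem.Int.floordiv_eq_ediv_of_pos (by omega)
      set m := lo + PySem.Int.floordiv (hi - lo) 2 with hm
      have hm' : m = lo + (hi - lo) / 2 := by rw [hm, hfd]
      have hlom : lo ≤ m := by omega
      have hmhi : m < hi := by omega
      have htn : pvTimeNeededA times m = pvTimeNeededB times m.toNat :=
        pvTn_eq times m (by omega)
      by_cases hc : pvTimeNeededB times m.toNat ≤ T
      · have hAstep : pvBsLoopA times T (fA' + 1) lo hi medium = pvBsLoopA times T fA' lo m m := by
          simp only [pvBsLoopA]
          rw [if_pos h2, ← hm, htn, if_pos hc]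
        have hBstep : pvSearchB times T (fB' + 1) lo hi =
            if lo < m then pvSearchB times T fB' lo m else m := by
          simp only [pvSearchB]
          rw [← hm, if_pos hc]
        rw [hAstep, hBstep]
        by_cases hlm : lo < m
        · rw [if_pos hlm]
          exact ih lo m m fA' fB' h1 hlm (by omega) (by omega) (by omega)
        · rw [if_neg hlm]
          obtain ⟨fA'', rfl⟩ : ∃ f, fA' = f + 1 := ⟨fA' - 1, by omega⟩
          exact pvBsA_stop times T fA'' lo m m (by omega)
      · have hAstep : pvBsLoopA times T (fA' + 1) lo hi medium = pvBsLoopA times T fA' (m + 1) hi m := by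
          simp only [pvBsLoopA]
          rw [if_pos h2, ← hm, htn, if_neg hc]
        have hBstep : pvSearchB times T (fB' + 1) lo hi =
            if m + 1 < hi then pvSearchB times T fB' (m + 1) hi else m := by
          simp only [pvSearchB]
          rw [← hm, if_neg hc]
        rw [hAstep, hBstep]
        by_cases hmh : m + 1 < hi
        · rw [if_pos hmh]
          exact ih (m + 1) hi m fA' fB' (by omega) hmh (by omega) (by omega) (by omega)
        · rw [if_neg hmh]
          obtain ⟨fA'', rfl⟩ : ∃ f, fA' = f + 1 := ⟨fA' - 1, by omega⟩
          exact pvBsA_stop times T fA'' (m + 1) hi m (by omega)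

-- ===== VERDICT (by name: the statement is the Claim_ definition above) =====
theorem minWorkers_spec : Claim_equal_minWorkers := by
  intro times T _ hpre
  unfold Spec_minWorkers minWorkers minWorkers_alt
  have hlen : 0 < times.length := List.length_pos_iff.mpr hpre
  exact pvBs_eq times T times.length 1 ((times.length : Int) + 1) 0
    (times.length + 2) (times.length + 2) le_rfl (by omega) (by omega) (by omega) (by omega)
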